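-- pv_equiv track=rewrite | github.com/danishshaikh06/leetcode | array/find_the_duplicate.py | duplicate
-- ===== SOURCE A (Python) =====
-- def duplicate(arr):
--     seen = set()
--     duplicate = 0
--     for i in arr:
--         if i in seen:
--             duplicate = i
--         else:
--             seen.add(i)
--
--     return duplicate
--
-- arr = [2,2,2,2,2]
-- ===== SOURCE B (Python) =====
-- def duplicate(arr):
--     counts = {}
--     for x in arr:
--         counts[x] = counts.get(x, 0) + 1
--     for x in reversed(arr):
--         if counts[x] >= 2:
--             return x
--     return 0
-- ===== Notes on version B (the rewrite author's own statement) =====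
-- stated objective: alternative
-- what changed: Replaces the single forward seen-set loop (which keeps overwriting the last duplicate) with two passes: build a frequency table, then scan the array in reverse and return the first element whose count is at least 2.
import Mathlib
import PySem

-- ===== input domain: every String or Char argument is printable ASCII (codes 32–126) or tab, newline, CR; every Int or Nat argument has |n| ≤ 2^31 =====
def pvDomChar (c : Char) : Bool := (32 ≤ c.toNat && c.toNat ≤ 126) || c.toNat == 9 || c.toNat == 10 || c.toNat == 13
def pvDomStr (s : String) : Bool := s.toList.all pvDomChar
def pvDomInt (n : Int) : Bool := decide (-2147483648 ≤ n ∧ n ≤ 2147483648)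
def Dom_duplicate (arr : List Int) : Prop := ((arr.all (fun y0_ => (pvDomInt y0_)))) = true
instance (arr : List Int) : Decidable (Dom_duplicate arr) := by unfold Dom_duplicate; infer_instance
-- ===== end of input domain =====

-- B replaces A's single forward seen-set loop by two passes: a frequency table, then a reverse scan
-- returning the first element with count ≥ 2 (alternative decomposition, same cost).


-- ===== PORT A =====
-- seen = set(); duplicate = 0; for i in arr: if i in seen: duplicate = i else: seen.add(i)
def duplicate (arr : List Int) : Int :=
  (arr.foldl
    (fun (st : PySem.Set Int × Int) i =>
      if i ∈ st.1 then (st.1, i) else (st.1.add i, st.2))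
    (PySem.Set.empty, 0)).2

-- ===== PORT B =====
-- counts = {}; for x in arr: counts[x] = counts.get(x, 0) + 1
def countsOf (arr : List Int) : PySem.Dict Int Int :=
  arr.foldl (fun d x => d.insert x (d.getD x 0 + 1)) PySem.Dict.empty

-- for x in reversed(arr): if counts[x] >= 2: return x  /  return 0
def scanRev (counts : PySem.Dict Int Int) : List Int → Int
  | [] => 0
  | x :: rest => if 2 ≤ counts.getD x 0 then x else scanRev counts rest

def duplicate_alt (arr : List Int) : Int := scanRev (countsOf arr) arr.reverse

-- ===== PRECONDITION & SPEC =====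
def Spec_duplicate (arr : List Int) (out : Int) : Prop := out = duplicate_alt arr
instance (arr : List Int) (out : Int) : Decidable (Spec_duplicate arr out) := by unfold Spec_duplicate; infer_instance

-- ===== CLAIM (what is proved, stated in full; the proofs are below) =====
def Claim_equal_duplicate : Prop := ∀ (arr : List Int), Dom_duplicate arr → Spec_duplicate arr (duplicate arr)

-- ===== LEMMAS AND PROOFS =====

-- membership in A's running 'seen' set after any prefix
theorem seen_mem (l : List Int) (s : PySem.Set Int) (d : Int) (y : Int) :
    (y ∈ (l.foldl (fun (st : PySem.Set Int × Int) i =>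
        if i ∈ st.1 then (st.1, i) else (st.1.add i, st.2)) (s, d)).1) ↔ y ∈ s ∨ y ∈ l := by
  induction l generalizing s d with
  | nil => simp
  | cons x t ih =>
    simp only [List.foldl_cons]
    by_cases hx : x ∈ s
    · rw [if_pos hx, ih]
      simp only [List.mem_cons]
      constructor
      · tauto
      · rintro (h | rfl | h)
        · exact Or.inl h
        · exact Or.inl hx
        · exact Or.inr h
    · rw [if_neg hx, ih]
      simp only [PySem.Set.mem_add, List.mem_cons]
      tauto

-- A's snoc step
theorem dupA_snoc (l : List Int) (x : Int) :
    duplicate (l ++ [x]) = if x ∈ l then x else duplicate l := by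
  unfold duplicate
  rw [List.foldl_append]
  simp only [List.foldl_cons, List.foldl_nil]
  by_cases hx : x ∈ (l.foldl (fun (st : PySem.Set Int × Int) i =>
      if i ∈ st.1 then (st.1, i) else (st.1.add i, st.2)) (PySem.Set.empty, 0)).1
  · have hmem : x ∈ l := by
      have := (seen_mem l PySem.Set.empty 0 x).mp hx
      simpa [PySem.Set.empty] using this
    rw [if_pos hx, if_pos hmem]
  · have hx' : x ∉ l := fun h => hx ((seen_mem l PySem.Set.empty 0 x).mpr (Or.inr h))
    rw [if_neg hx, if_neg hx']

-- the counts table is the multiset of counts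
theorem countsOf_getD (arr : List Int) (y : Int) :
    (countsOf arr).getD y 0 = arr.count y := by
  unfold countsOf
  rw [PySem.Dict.getD_foldl_insert_add_one]
  simp [PySem.Dict.empty, PySem.Dict.getD, PySem.Dict.get?]

-- the reverse scan only reads counts of elements of the list
theorem scanRev_congr (c1 c2 : PySem.Dict Int Int) (l : List Int)
    (h : ∀ y ∈ l, c1.getD y 0 = c2.getD y 0) : scanRev c1 l = scanRev c2 l := by
  induction l with
  | nil => rfl
  | cons x t ih =>
    simp only [scanRev]
    rw [h x (by simp), ih (fun y hy => h y (by simp [hy]))]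

-- B's snoc step
theorem dupB_snoc (l : List Int) (x : Int) :
    duplicate_alt (l ++ [x]) = if x ∈ l then x else duplicate_alt l := by
  unfold duplicate_alt
  rw [List.reverse_append]
  simp only [List.reverse_cons, List.reverse_nil, List.nil_append, List.singleton_append]
  simp only [scanRev]
  have hx : (countsOf (l ++ [x])).getD x 0 = l.count x + 1 := by
    rw [countsOf_getD]; simp [List.count_append]
  by_cases hmem : x ∈ l
  · have : 2 ≤ (countsOf (l ++ [x])).getD x 0 := by
      rw [hx]
      have := List.one_le_count_iff.mpr hmem
      omega
    simp [this, hmem]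
  · have h1 : ¬ (2 ≤ (countsOf (l ++ [x])).getD x 0) := by
      rw [hx]
      have : l.count x = 0 := List.count_eq_zero.mpr hmem
      omega
    simp [h1, hmem]
    exact scanRev_congr _ _ _ (fun y hy => by
      rw [countsOf_getD, countsOf_getD, List.count_append]
      have hyx : y ≠ x := fun h => hmem (h ▸ (List.mem_reverse.mp hy))
      simp [Ne.symm hyx])

theorem dup_eq (arr : List Int) : duplicate arr = duplicate_alt arr := by
  induction arr using List.reverseRecOn with
  | nil => rfl
  | append_singleton l x ih => rw [dupA_snoc, dupB_snoc, ih]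

-- ===== VERDICT (by name: the statement is the Claim_ definition above) =====
theorem duplicate_spec : Claim_equal_duplicate := by
  intro arr _
  exact dup_eq arr
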